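-- pv_equiv track=rewrite | github.com/IronVoidForge/FilmCreator | orchestrator/world_registry.py | summarize_registry_status
-- ===== SOURCE A (Python) =====
-- def summarize_registry_status(registry: dict) -> tuple[list[str], list[str]]:
--     canonical_ids: list[str] = []
--     provisional_ids: list[str] = []
--     for canonical_id, entry in sorted(registry.items()):
--         if entry.get("status") == "provisional":
--             provisional_ids.append(canonical_id)
--         else:
--             canonical_ids.append(canonical_id)
--     return canonical_ids, provisional_ids
-- ===== SOURCE B (Python) =====
-- def _insort(bucket: list, x: str) -> None:
--     lo, hi = 0, len(bucket)
--     while lo < hi: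
--         mid = (lo + hi) // 2
--         if bucket[mid] < x:
--             lo = mid + 1
--         else:
--             hi = mid
--     bucket.insert(lo, x)
--
--
-- def summarize_registry_status(registry: dict) -> tuple[list[str], list[str]]:
--     buckets: tuple[list[str], list[str]] = ([], [])
--     for canonical_id, entry in registry.items():
--         _insort(buckets[entry.get("status") == "provisional"], canonical_id)
--     return buckets
-- ===== Notes on version B (the rewrite author's own statement) =====
-- stated objective: alternative
-- what changed: B never calls sort: scanning the dict in native insertion order, it places each id directly at its sorted position in its bucket by binary search + insert (online insertion sort per bucket), instead of A's sort-all-items-first-then-partition.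
import Mathlib
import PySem

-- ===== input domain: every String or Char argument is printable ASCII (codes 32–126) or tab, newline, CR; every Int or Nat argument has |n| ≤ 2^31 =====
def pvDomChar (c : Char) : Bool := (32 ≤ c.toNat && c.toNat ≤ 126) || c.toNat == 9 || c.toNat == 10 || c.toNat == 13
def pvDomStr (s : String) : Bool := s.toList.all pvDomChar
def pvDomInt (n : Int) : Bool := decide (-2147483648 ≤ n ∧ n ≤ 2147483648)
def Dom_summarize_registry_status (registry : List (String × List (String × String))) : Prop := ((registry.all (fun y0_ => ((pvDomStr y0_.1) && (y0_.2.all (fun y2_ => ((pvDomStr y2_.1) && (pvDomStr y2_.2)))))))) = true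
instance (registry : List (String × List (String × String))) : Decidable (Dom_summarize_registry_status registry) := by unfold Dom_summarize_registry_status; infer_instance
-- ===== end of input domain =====

-- B never calls sort: it places each id directly at its sorted position in its bucket
-- (online insertion sort per bucket) while scanning the dict in native order, instead of
-- A's sort-all-items-then-partition; same two sorted lists (alternative algorithm, not faster).

-- shared by both ports: entry.get("status") == "provisional" (entry arrives as an
-- association list; Python builds a dict from it, so lookup is Dict.ofList)
def pvIsProv (entry : List (String × String)) : Bool :=
  (PySem.Dict.ofList entry).get? "status" == some "provisional"

-- ===== PORT A =====
-- Python's sorted(registry.items()) compares (key, value) tuples, but dict keys are unique,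
-- so the order is exactly the key order: ported as a key-sort on the first component (exact).
def summarize_registry_status (registry : List (String × List (String × String))) : List String × List String :=
  let s := PySem.List.sorted (PySem.Dict.ofList registry).items (fun p => p.1) false
  s.foldl (fun acc p =>
      if pvIsProv p.2 then (acc.1, acc.2 ++ [p.1]) else (acc.1 ++ [p.1], acc.2))
    ([], [])

-- ===== PORT B =====
-- _insort: binary search for the insertion point (while lo < hi: bisect on bucket[mid] < x),
-- then bucket.insert(lo, x) — ported with PySem's bisect_left primitive (PySem.List.bisectLeft
-- is exactly this loop) and PySem.List.insert (exact)
def pvInsort (bucket : List String) (x : String) : List String :=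
  PySem.List.insert bucket (PySem.List.bisectLeft bucket x) x

def summarize_registry_status_alt (registry : List (String × List (String × String))) : List String × List String :=
  (PySem.Dict.ofList registry).items.foldl (fun buckets p =>
      if pvIsProv p.2 then (buckets.1, pvInsort buckets.2 p.1) else (pvInsort buckets.1 p.1, buckets.2))
    ([], [])

-- ===== PRECONDITION & SPEC =====
def Spec_summarize_registry_status (registry : List (String × List (String × String))) (out : List String × List String) : Prop := out = summarize_registry_status_alt registry
instance (registry : List (String × List (String × String))) (out : List String × List String) : Decidable (Spec_summarize_registry_status registry out) := by unfold Spec_summarize_registry_status; infer_instance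

-- ===== CLAIM (what is proved, stated in full; the proofs are below) =====
def Claim_equal_summarize_registry_status : Prop := ∀ (registry : List (String × List (String × String))), Dom_summarize_registry_status registry → Spec_summarize_registry_status registry (summarize_registry_status registry)

-- ===== LEMMAS AND PROOFS =====

-- A's partition loop, characterised: it appends the ids of the non-provisional /
-- provisional entries (in list order) to the two accumulators
theorem pv_fold_partition (pr : List (String × String) → Bool)
    (l : List (String × List (String × String))) (c p : List String) :
    l.foldl (fun acc q =>
        if pr q.2 then (acc.1, acc.2 ++ [q.1]) else (acc.1 ++ [q.1], acc.2)) (c, p)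
      = (c ++ (l.filter (fun q => !pr q.2)).map (·.1),
         p ++ (l.filter (fun q => pr q.2)).map (·.1)) := by
  induction l generalizing c p with
  | nil => simp
  | cons h t ih =>
    by_cases hp : pr h.2 = true <;> simp [List.foldl_cons, hp, ih]

-- invariant of the hand-rolled bisect loop: the returned index splits the sorted bucket
-- into a strictly-smaller prefix and a ≥ x suffix
theorem pv_bisectLoop_spec (xs : List String) (x : String)
    (hmono : ∀ (i j : Nat) (hi : i < xs.length) (hj : j < xs.length), i ≤ j → xs[i] ≤ xs[j]) :
    ∀ (fuel lo hi : Nat), lo ≤ hi → hi ≤ xs.length → hi - lo ≤ fuel →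
    (∀ j (hj : j < xs.length), j < lo → xs[j] < x) →
    (∀ j (hj : j < xs.length), hi ≤ j → x ≤ xs[j]) →
    lo ≤ PySem.List.bisectLeftLoop xs x fuel lo hi ∧
    PySem.List.bisectLeftLoop xs x fuel lo hi ≤ hi ∧
    (∀ j (hj : j < xs.length), j < PySem.List.bisectLeftLoop xs x fuel lo hi → xs[j] < x) ∧
    (∀ j (hj : j < xs.length), PySem.List.bisectLeftLoop xs x fuel lo hi ≤ j → x ≤ xs[j]) := by
  intro fuel
  induction fuel with
  | zero =>
    intro lo hi hlh hhl hf hlt hge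
    have hz : PySem.List.bisectLeftLoop xs x 0 lo hi = lo := rfl
    rw [hz]
    have : lo = hi := by omega
    exact ⟨le_refl _, hlh, hlt, by subst this; exact hge⟩
  | succ n ih =>
    intro lo hi hlh hhl hf hlt hge
    by_cases hcmp : lo < hi
    · have hmid : (lo + hi) / 2 < xs.length := by omega
      have hx : xs[(lo + hi) / 2]? = some xs[(lo + hi) / 2] := List.getElem?_eq_getElem hmid
      by_cases hy : xs[(lo + hi) / 2] < x
      · have step : PySem.List.bisectLeftLoop xs x (n+1) lo hi
            = PySem.List.bisectLeftLoop xs x n ((lo + hi) / 2 + 1) hi := by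
          simp [PySem.List.bisectLeftLoop, hcmp, hx, hy]
        rw [step]
        refine (ih ((lo + hi) / 2 + 1) hi (by omega) hhl (by omega) ?_ hge).imp (by omega) id
        intro j hj hjlt
        rcases Nat.lt_or_ge j lo with h | h
        · exact hlt j hj h
        · exact lt_of_le_of_lt (hmono j _ hj hmid (by omega)) hy
      · have step : PySem.List.bisectLeftLoop xs x (n+1) lo hi
            = PySem.List.bisectLeftLoop xs x n lo ((lo + hi) / 2) := by
          simp [PySem.List.bisectLeftLoop, hcmp, hx, hy]
        rw [step]
        refine (ih lo ((lo + hi) / 2) (by omega) (by omega) (by omega) hlt ?_).imp id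
          (fun h => ⟨by omega, h.2⟩)
        intro j hj hjge
        exact (le_of_not_gt hy).trans (hmono _ j hmid hj hjge)
    · have hz : PySem.List.bisectLeftLoop xs x (n+1) lo hi = lo := by
        simp [PySem.List.bisectLeftLoop, hcmp]
      rw [hz]
      have : lo = hi := by omega
      exact ⟨le_refl _, hlh, hlt, by subst this; exact hge⟩

theorem pv_pairwise_mono (l : List String) (hc : l.Pairwise (· ≤ ·)) :
    ∀ (i j : Nat) (h1 : i < l.length) (h2 : j < l.length), i ≤ j → l[i] ≤ l[j] := by
  intro i j h1 h2 hij
  by_cases h : i < j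
  · exact List.pairwise_iff_getElem.mp hc i j h1 h2 h
  · have : i = j := by omega
    subst this; exact le_refl _

-- one binary-search insertion into a sorted bucket keeps it sorted and adds exactly x
theorem pv_insort_step (l : List String) (x : String) (hc : l.Pairwise (· ≤ ·)) :
    (pvInsort l x).Pairwise (· ≤ ·) ∧ (pvInsort l x).Perm (x :: l) := by
  obtain ⟨h0, hle, hlt, hge⟩ :=
    pv_bisectLoop_spec l x (pv_pairwise_mono l hc) l.length 0 l.length (Nat.zero_le _)
      (le_refl _) (by omega) (by intro j hj h; omega) (by intro j hj h; omega)
  set i := PySem.List.bisectLeftLoop l x l.length 0 l.length with hidef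
  have hbi : PySem.List.bisectLeft l x = i := rfl
  have heq : pvInsort l x = l.take i ++ x :: l.drop i := by
    unfold pvInsort
    rw [hbi]
    exact PySem.List.insert_natCast l i x hle
  constructor
  · rw [heq]
    refine List.pairwise_append.mpr ⟨hc.sublist (List.take_sublist _ _), ?_, ?_⟩
    · refine List.pairwise_cons.mpr ⟨?_, hc.sublist (List.drop_sublist _ _)⟩
      intro y hy
      obtain ⟨k, hk, rfl⟩ := List.mem_iff_getElem.mp hy
      have hk' : k < l.length - i := by simpa using hk
      rw [List.getElem_drop]
      exact hge _ (by omega) (by omega)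
    · intro a ha b hb
      obtain ⟨j, hj, rfl⟩ := List.mem_iff_getElem.mp ha
      have hj' : j < min i l.length := by simpa using hj
      rw [List.getElem_take]
      have hax : l[j] < x := hlt j (by omega) (by omega)
      rcases List.mem_cons.mp hb with rfl | hb2
      · exact le_of_lt hax
      · obtain ⟨k, hk, rfl⟩ := List.mem_iff_getElem.mp hb2
        have hk' : k < l.length - i := by simpa using hk
        rw [List.getElem_drop]
        exact (le_of_lt hax).trans (hge _ (by omega) (by omega))
  · rw [heq]
    have h1 : (l.take i ++ x :: l.drop i).Perm (x :: (l.take i ++ l.drop i)) :=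
      List.perm_middle
    rwa [List.take_append_drop] at h1

-- folding insort from a sorted start stays sorted and collects exactly the inserted ids
theorem pv_insort_fold (ys : List String) (l : List String) (hl : l.Pairwise (· ≤ ·)) :
    (ys.foldl pvInsort l).Pairwise (· ≤ ·) ∧ (ys.foldl pvInsort l).Perm (l ++ ys) := by
  induction ys generalizing l with
  | nil => exact ⟨hl, by simp⟩
  | cons y t ih =>
    obtain ⟨hp, hperm⟩ := pv_insort_step l y hl
    obtain ⟨ih1, ih2⟩ := ih (pvInsort l y) hp
    refine ⟨ih1, ?_⟩
    have h2 : (pvInsort l y ++ t).Perm ((y :: l) ++ t) := hperm.append_right t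
    exact (ih2.trans h2).trans List.perm_middle.symm

-- the insertion-sorted bucket IS Python's sorted() of the collected ids
theorem pv_insort_fold_sorted (ys : List String) :
    ys.foldl pvInsort [] = PySem.List.sorted ys (fun x => x) false := by
  obtain ⟨h1, h2⟩ := pv_insort_fold ys [] List.Pairwise.nil
  exact (PySem.List.sorted_id_eq_of_perm_of_pairwise _ _ (by simpa using h2) h1).symm

-- B's loop splits into two independent insertion-sort folds over the filtered ids
theorem pv_fold_split (pr : List (String × String) → Bool)
    (l : List (String × List (String × String))) (c p : List String) :
    l.foldl (fun acc q =>
        if pr q.2 then (acc.1, pvInsort acc.2 q.1) else (pvInsort acc.1 q.1, acc.2)) (c, p)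
      = (((l.filter (fun q => !pr q.2)).map (·.1)).foldl pvInsort c,
         ((l.filter (fun q => pr q.2)).map (·.1)).foldl pvInsort p) := by
  induction l generalizing c p with
  | nil => simp
  | cons h t ih =>
    by_cases hp : pr h.2 = true <;> simp [List.foldl_cons, hp, ih]

-- for a list with pairwise-distinct first components, sorting the first components of a
-- filtered sublist equals filtering the key-sorted list and taking first components
theorem pv_sorted_filter_map (pr : (String × List (String × String)) → Bool)
    (l : List (String × List (String × String)))
    (hnd : (l.map (·.1)).Nodup) :
    PySem.List.sorted ((l.filter pr).map (·.1)) (fun x => x) false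
      = ((PySem.List.sorted l (fun p => p.1) false).filter pr).map (·.1) := by
  set S := PySem.List.sorted l (fun p => p.1) false with hS
  have hperm : S.Perm l := PySem.List.sorted_perm l (fun p => p.1) false
  have hle : S.Pairwise (fun a b => a.1 ≤ b.1) :=
    PySem.List.sorted_pairwise l (fun p => p.1)
  have hndS : (S.map (·.1)).Nodup := ((hperm.map (·.1)).nodup_iff).mpr hnd
  have hne : S.Pairwise (fun a b => a.1 ≠ b.1) := (List.pairwise_map).mp hndS
  have hlt : S.Pairwise (fun a b => a.1 < b.1) :=
    (hle.and hne).imp (fun h => lt_of_le_of_ne h.1 h.2)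
  refine PySem.List.sorted_eq_of_perm_of_pairwise_lt _ _ _ ?_ ?_
  · exact ((hperm.filter pr).map (·.1))
  · exact (List.pairwise_map).mpr (hlt.filter pr)

-- ===== VERDICT (by name: the statement is the Claim_ definition above) =====
theorem summarize_registry_status_spec : Claim_equal_summarize_registry_status := by
  intro registry _
  unfold Spec_summarize_registry_status summarize_registry_status summarize_registry_status_alt
  have hnd : ((PySem.Dict.ofList registry).items.map (·.1)).Nodup := by
    have := PySem.Dict.nodup_keys_ofList (κ := String) (ν := List (String × String)) registry
    simpa [PySem.Dict.keys] using this
  simp only [pv_fold_partition, pv_fold_split, List.nil_append]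
  refine Prod.ext ?_ ?_ <;>
    simp only [pv_insort_fold_sorted, pv_sorted_filter_map _ _ hnd]
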